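-- pv_equiv track=rewrite | github.com/HappytestR/--- | ICS2020/algorithmtest/biaoqian.py | Initdata1
-- ===== SOURCE A (Python) =====
-- def Initdata1(item_user,movie_tags,tags):     #计算item_tags矩阵{user,item,item_tags}
--     key1=item_user.keys()                     #在这里的化标签的标出应该在文件tags.csv中，从那里面获取数据
--     item_tags={}
--     for i in key1:
--         item_tags.setdefault(i,{})
--         for j in tags:
--             item_tags[i][j]=0
--     for i in movie_tags.keys():
--         for j in movie_tags[i]:
--             try:
--                 item_tags[i][j]+=1
--             except Exception as e:
--                 continue
--     return item_tags
-- ===== SOURCE B (Python) =====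
-- def Initdata1(item_user, movie_tags, tags):
--     # No mutable counters at all: each matrix cell is computed directly, in
--     # closed form, as movie_tags.get(i, []).count(j) — replacing A's staged
--     # zero-init pass plus try/except-guarded increment pass over movie_tags.
--     return {i: {j: movie_tags.get(i, []).count(j) for j in tags}
--             for i in item_user}
-- ===== Notes on version B (the rewrite author's own statement) =====
-- stated objective: simpler
-- what changed: A nested dict comprehension computes every cell directly as movie_tags.get(i, []).count(j), replacing A's two staged mutation passes (zero-init over item_user keys, then try/except-guarded in-place increments while traversing movie_tags).
import Mathlib
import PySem

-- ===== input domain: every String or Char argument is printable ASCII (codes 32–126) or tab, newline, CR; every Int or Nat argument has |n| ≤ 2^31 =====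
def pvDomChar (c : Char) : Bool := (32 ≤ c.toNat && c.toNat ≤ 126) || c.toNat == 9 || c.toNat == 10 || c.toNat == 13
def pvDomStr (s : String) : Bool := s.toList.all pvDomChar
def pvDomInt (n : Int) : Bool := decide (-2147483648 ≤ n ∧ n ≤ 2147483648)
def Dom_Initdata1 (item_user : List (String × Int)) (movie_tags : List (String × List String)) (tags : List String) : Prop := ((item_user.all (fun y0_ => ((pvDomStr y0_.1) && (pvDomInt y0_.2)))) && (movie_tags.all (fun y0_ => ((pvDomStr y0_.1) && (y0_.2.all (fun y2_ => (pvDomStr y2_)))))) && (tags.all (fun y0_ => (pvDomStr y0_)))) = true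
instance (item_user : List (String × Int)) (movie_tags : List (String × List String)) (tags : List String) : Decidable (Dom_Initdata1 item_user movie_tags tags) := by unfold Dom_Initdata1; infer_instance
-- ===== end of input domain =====

-- B computes every cell of the matrix directly in closed form (row.count(tag) in a nested
-- dict comprehension) instead of A's staged mutation: zero-init pass plus try/except-guarded
-- increments while traversing movie_tags — objective: simpler, same result.

-- ===== PORT A =====
def Initdata1 (item_user : List (String × Int)) (movie_tags : List (String × List String)) (tags : List String) : List (String × List (String × Int)) :=
  let iu : PySem.Dict String Int := PySem.Dict.ofList item_user
  let mt : PySem.Dict String (List String) := PySem.Dict.ofList movie_tags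
  let key1 := iu.keys
  -- first loop: item_tags.setdefault(i, {}); for j in tags: item_tags[i][j] = 0
  let it1 : PySem.Dict String (PySem.Dict String Int) :=
    key1.foldl (fun d i =>
      tags.foldl (fun d j => d.insert i ((d.getD i PySem.Dict.empty).insert j 0))
        (d.setdefault i PySem.Dict.empty)) PySem.Dict.empty
  -- second loop: for i in movie_tags.keys(): for j in movie_tags[i]: try item_tags[i][j] += 1 except: continue
  let it2 : PySem.Dict String (PySem.Dict String Int) :=
    mt.keys.foldl (fun d i =>
      (mt.getD i []).foldl (fun d j =>
        match d.get? i with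
        | none => d                      -- KeyError on item_tags[i]: continue
        | some inner =>
          match inner.get? j with
          | none => d                    -- KeyError on [j]: continue
          | some v => d.insert i (inner.insert j (v + 1))) d) it1
  it2.items.map (fun p => (p.1, p.2.items))

-- ===== PORT B =====
def Initdata1_alt (item_user : List (String × Int)) (movie_tags : List (String × List String)) (tags : List String) : List (String × List (String × Int)) :=
  let mt : PySem.Dict String (List String) := PySem.Dict.ofList movie_tags
  -- {i: {j: movie_tags.get(i, []).count(j) for j in tags} for i in item_user}
  let res : PySem.Dict String (PySem.Dict String Int) :=
    (PySem.Dict.ofList item_user : PySem.Dict String Int).keys.foldl (fun res i =>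
      res.insert i
        (tags.foldl (fun c j => c.insert j ((PySem.List.count (mt.getD i []) j : Int)))
          (PySem.Dict.empty : PySem.Dict String Int)))
      PySem.Dict.empty
  res.items.map (fun p => (p.1, p.2.items))

-- ===== PRECONDITION & SPEC =====
def Spec_Initdata1 (item_user : List (String × Int)) (movie_tags : List (String × List String)) (tags : List String) (out : List (String × List (String × Int))) : Prop := out = Initdata1_alt item_user movie_tags tags
instance (item_user : List (String × Int)) (movie_tags : List (String × List String)) (tags : List String) (out : List (String × List (String × Int))) : Decidable (Spec_Initdata1 item_user movie_tags tags out) := by unfold Spec_Initdata1; infer_instance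

-- ===== CLAIM (what is proved, stated in full; the proofs are below) =====
def Claim_equal_Initdata1 : Prop := ∀ (item_user : List (String × Int)) (movie_tags : List (String × List String)) (tags : List String), Dom_Initdata1 item_user movie_tags tags → Spec_Initdata1 item_user movie_tags tags (Initdata1 item_user movie_tags tags)

-- ===== LEMMAS AND PROOFS =====

-- the all-zeros row built from tags
def zerosD (tags : List String) : PySem.Dict String Int :=
  tags.foldl (fun c j => c.insert j 0) PySem.Dict.empty

-- B's row for a given tag list lst: each cell is lst.count j
def countRow (tags : List String) (lst : List String) : PySem.Dict String Int :=
  tags.foldl (fun c j => c.insert j ((PySem.List.count lst j : Int))) PySem.Dict.empty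

-- A's inner increment loop over one tag list, acting on the row only
def bumpA (c : PySem.Dict String Int) (lst : List String) : PySem.Dict String Int :=
  lst.foldl (fun c j => match c.get? j with | none => c | some v => c.insert j (v + 1)) c

-- a dict with nodup keys is unchanged by re-inserting a present binding
lemma insert_get?_self {κ ν : Type} [BEq κ] [LawfulBEq κ] (d : PySem.Dict κ ν) (k : κ) (v : ν)
    (hnd : d.keys.Nodup) (h : d.get? k = some v) : d.insert k v = d := by
  apply PySem.Dict.ext
  rw [PySem.Dict.items_insert_of_contains]
  · conv_rhs => rw [← List.map_id d.items]
    apply List.map_congr_left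
    rintro ⟨k', v'⟩ hp
    by_cases hk : k' == k
    · have hget : d.get? k' = some v' := PySem.Dict.get?_of_mem_items d hp hnd
      have hpk : k' = k := by simpa using hk
      rw [hpk, h] at hget
      simp [hpk, Option.some_inj.mp hget]
    · simp [hk]
  · rw [PySem.Dict.contains_eq_isSome_get?, h]; rfl

-- A's row-init inner loop starting from an insert
lemma initRow_loop (tags : List String) (d : PySem.Dict String (PySem.Dict String Int)) (i : String)
    (v0 : PySem.Dict String Int) :
    tags.foldl (fun d j => d.insert i ((d.getD i PySem.Dict.empty).insert j 0)) (d.insert i v0)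
      = d.insert i (tags.foldl (fun c j => c.insert j 0) v0) := by
  induction tags generalizing v0 with
  | nil => rfl
  | cons j rest ih =>
    simp only [List.foldl_cons, PySem.Dict.getD_insert_self, PySem.Dict.insert_insert_self]
    exact ih (v0.insert j 0)

-- A's first pass over fresh distinct keys builds the zero matrix
lemma phase1_eq (tags : List String) (ks : List String) (d : PySem.Dict String (PySem.Dict String Int))
    (hnd : ks.Nodup) (hfresh : ∀ i ∈ ks, d.contains i = false) :
    ks.foldl (fun d i =>
        tags.foldl (fun d j => d.insert i ((d.getD i PySem.Dict.empty).insert j 0))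
          (d.setdefault i PySem.Dict.empty)) d
      = PySem.Dict.mk (d.items ++ ks.map (fun i => (i, zerosD tags))) := by
  induction ks generalizing d with
  | nil => simp
  | cons i rest ih =>
    have hi : d.contains i = false := hfresh i (by simp)
    have hrest : ∀ k ∈ rest, (d.insert i (zerosD tags)).contains k = false := by
      intro k hk
      rw [PySem.Dict.contains_insert]
      have hne : (k == i) = false := by
        have : i ∉ rest := (List.nodup_cons.mp hnd).1
        simp only [beq_eq_false_iff_ne, ne_eq]
        rintro rfl; exact this hk
      simp [hne, hfresh k (List.mem_cons_of_mem _ hk)]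
    simp only [List.foldl_cons]
    rw [PySem.Dict.setdefault_of_not_contains (h := hi), initRow_loop]
    rw [show (tags.foldl (fun c j => c.insert j 0) PySem.Dict.empty) = zerosD tags from rfl]
    rw [ih _ (List.nodup_cons.mp hnd).2 hrest,
      PySem.Dict.items_insert_of_not_contains (h := hi)]
    simp

-- A's increment loop over one tag list, when the row is absent
lemma phase2_inner_none (lst : List String) (d : PySem.Dict String (PySem.Dict String Int)) (i : String)
    (h : d.get? i = none) :
    lst.foldl (fun d j =>
        match d.get? i with
        | none => d
        | some inner =>
          match inner.get? j with
          | none => d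
          | some v => d.insert i (inner.insert j (v + 1))) d = d := by
  induction lst with
  | nil => rfl
  | cons j rest ih => simp only [List.foldl_cons, h]; exact ih

-- A's increment loop over one tag list, acting on a present row
lemma phase2_inner_some (lst : List String) (d : PySem.Dict String (PySem.Dict String Int)) (i : String)
    (inner : PySem.Dict String Int) :
    lst.foldl (fun d j =>
        match d.get? i with
        | none => d
        | some inner =>
          match inner.get? j with
          | none => d
          | some v => d.insert i (inner.insert j (v + 1))) (d.insert i inner)
      = d.insert i (bumpA inner lst) := by
  induction lst generalizing inner with
  | nil => rfl
  | cons j rest ih =>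
    simp only [List.foldl_cons, PySem.Dict.get?_insert_self]
    cases h : inner.get? j with
    | none => simp only [bumpA, List.foldl_cons, h]; exact ih inner
    | some v =>
      simp only [bumpA, List.foldl_cons, h, PySem.Dict.insert_insert_self]
      exact ih (inner.insert j (v + 1))

lemma keys_mk_map (ks : List String) (g : String → PySem.Dict String Int) :
    (PySem.Dict.mk (ks.map (fun k => (k, g k)))).keys = ks := by
  simp [PySem.Dict.keys, Function.comp_def]

lemma get?_mk_map (ks : List String) (hks : ks.Nodup) (g : String → PySem.Dict String Int) (i : String) :
    (PySem.Dict.mk (ks.map (fun k => (k, g k)))).get? i = if i ∈ ks then some (g i) else none := by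
  split
  · next h =>
    exact PySem.Dict.get?_of_mem_items _ (List.mem_map_of_mem h)
      (by rw [keys_mk_map]; exact hks)
  · next h =>
    rw [PySem.Dict.get?_eq_none_iff_not_mem_keys, keys_mk_map]; exact h

lemma insert_mk_map (ks : List String) (g : String → PySem.Dict String Int) (i : String)
    (hi : i ∈ ks) (w : PySem.Dict String Int) :
    (PySem.Dict.mk (ks.map (fun k => (k, g k)))).insert i w
      = PySem.Dict.mk (ks.map (fun k => (k, if k = i then w else g k))) := by
  apply PySem.Dict.ext
  rw [PySem.Dict.items_insert_of_contains]
  · simp only [List.map_map]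
    apply List.map_congr_left
    intro k _
    by_cases hk : k = i <;> simp [hk]
  · rw [PySem.Dict.contains_eq_decide_mem_keys, keys_mk_map]; simp [hi]

-- A's whole second pass on a matrix of shape ks.map (k, g k)
lemma phase2_eq (mt : PySem.Dict String (List String)) (ks : List String) (hks : ks.Nodup)
    (ms : List String) (hms : ms.Nodup) (g : String → PySem.Dict String Int) :
    ms.foldl (fun d i =>
        (mt.getD i []).foldl (fun d j =>
          match d.get? i with
          | none => d
          | some inner =>
            match inner.get? j with
            | none => d
            | some v => d.insert i (inner.insert j (v + 1))) d)
      (PySem.Dict.mk (ks.map (fun k => (k, g k))))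
      = PySem.Dict.mk (ks.map (fun k => (k, if k ∈ ms then bumpA (g k) (mt.getD k []) else g k))) := by
  induction ms generalizing g with
  | nil => simp
  | cons i ms' ih =>
    have hnotms' : i ∉ ms' := (List.nodup_cons.mp hms).1
    simp only [List.foldl_cons]
    by_cases hi : i ∈ ks
    · have hget := get?_mk_map ks hks g i
      rw [if_pos hi] at hget
      have hrw : (PySem.Dict.mk (ks.map (fun k => (k, g k))))
          = (PySem.Dict.mk (ks.map (fun k => (k, g k)))).insert i (g i) := by
        rw [insert_get?_self _ _ _ (by rw [keys_mk_map]; exact hks) hget]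
      rw [hrw, phase2_inner_some, insert_mk_map _ _ _ hi,
        ih (List.nodup_cons.mp hms).2]
      congr 1
      apply List.map_congr_left
      intro k _
      by_cases hk : k = i
      · subst hk; simp [hnotms']
      · simp [hk, List.mem_cons]
    · have hget := get?_mk_map ks hks g i
      rw [if_neg hi] at hget
      rw [phase2_inner_none _ _ _ hget, ih (List.nodup_cons.mp hms).2]
      congr 1
      apply List.map_congr_left
      intro k hkks
      have hk : k ≠ i := fun h => hi (h ▸ hkks)
      simp [hk, List.mem_cons]

-- lookup in a fold of inserts whose values depend only on the key
lemma get?_foldl_insertF (tags : List String) (d : PySem.Dict String Int) (f : String → Int)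
    (x : String) :
    (tags.foldl (fun c j => c.insert j (f j)) d).get? x
      = if x ∈ tags then some (f x) else d.get? x := by
  induction tags generalizing d with
  | nil => simp
  | cons t ts ih =>
    simp only [List.foldl_cons]
    rw [ih]
    by_cases hts : x ∈ ts
    · simp [hts, List.mem_cons]
    · rw [PySem.Dict.get?_insert]
      by_cases hxt : x = t <;> simp [hxt, hts, List.mem_cons]

-- bumpA never changes the key list
lemma keys_bumpA (lst : List String) (c : PySem.Dict String Int) :
    (bumpA c lst).keys = c.keys := by
  induction lst generalizing c with
  | nil => rfl
  | cons j rest ih =>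
    simp only [bumpA, List.foldl_cons]
    cases h : c.get? j with
    | none => exact ih c
    | some v =>
      rw [show (rest.foldl (fun c j => match c.get? j with | none => c | some v => c.insert j (v + 1)) (c.insert j (v + 1))) = bumpA (c.insert j (v + 1)) rest from rfl,
        ih, PySem.Dict.keys_insert_of_contains]
      rw [PySem.Dict.contains_eq_isSome_get?, h]; rfl

-- bumpA adds, at each key already present, the number of its occurrences in lst
lemma get?_bumpA (lst : List String) (c : PySem.Dict String Int) (x : String) :
    (bumpA c lst).get? x = (c.get? x).map (fun v => v + (lst.count x : Int)) := by
  induction lst generalizing c with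
  | nil => cases h : c.get? x <;> simp [bumpA, h]
  | cons j rest ih =>
    simp only [bumpA, List.foldl_cons]
    cases hj : c.get? j with
    | none =>
      rw [show (rest.foldl (fun c j => match c.get? j with | none => c | some v => c.insert j (v + 1)) c) = bumpA c rest from rfl, ih]
      by_cases hxj : x = j
      · subst hxj; simp [hj]
      · simp [(Ne.symm hxj : j ≠ x)]
    | some v =>
      rw [show (rest.foldl (fun c j => match c.get? j with | none => c | some v => c.insert j (v + 1)) (c.insert j (v + 1))) = bumpA (c.insert j (v + 1)) rest from rfl, ih,
        PySem.Dict.get?_insert]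
      by_cases hxj : x = j
      · subst hxj
        simp only [hj, Option.map_some, List.count_cons, beq_self_eq_true, if_true]
        congr 1
        push_cast
        ring
      · simp [hxj, (Ne.symm hxj : j ≠ x)]

-- the key fact: A's zero-row-then-increment equals B's closed-form count row
lemma rowEq (tags : List String) (lst : List String) :
    bumpA (zerosD tags) lst = countRow tags lst := by
  have hz : ∀ x, (zerosD tags).get? x = if x ∈ tags then some 0 else none := by
    intro x
    have := get?_foldl_insertF tags PySem.Dict.empty (fun _ => 0) x
    simpa [zerosD] using this
  have hndz : (zerosD tags).keys.Nodup := by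
    unfold zerosD
    exact PySem.Dict.nodup_keys_foldl_insert tags (fun _ j => 0) _ (by simp)
  have hndb : (bumpA (zerosD tags) lst).keys.Nodup := by rw [keys_bumpA]; exact hndz
  have hndc : (countRow tags lst).keys.Nodup := by
    unfold countRow
    exact PySem.Dict.nodup_keys_foldl_insert tags (fun _ j => ((PySem.List.count lst j : Int))) _ (by simp)
  have hkz : (zerosD tags).keys = PySem.Set.ofList tags := by
    unfold zerosD
    rw [PySem.Dict.keys_foldl_insert (f := fun _ j => (0 : Int))]
    simp [PySem.Dict.keys_empty, PySem.Set.update, PySem.Set.ofList_eq_foldl]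
  have hkc : (countRow tags lst).keys = PySem.Set.ofList tags := by
    unfold countRow
    rw [PySem.Dict.keys_foldl_insert (f := fun _ j => ((PySem.List.count lst j : Int)))]
    simp [PySem.Dict.keys_empty, PySem.Set.update, PySem.Set.ofList_eq_foldl]
  apply PySem.Dict.ext
  rw [PySem.Dict.items_eq_map_keys _ hndb (0 : Int), PySem.Dict.items_eq_map_keys _ hndc (0 : Int),
    keys_bumpA, hkz, hkc]
  apply List.map_congr_left
  intro k hk
  have hkt : k ∈ tags := (PySem.Set.mem_ofList tags k).mp hk
  have hgb : (bumpA (zerosD tags) lst).getD k 0 = (lst.count k : Int) := by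
    rw [PySem.Dict.getD_eq_get?_getD, get?_bumpA, hz k, if_pos hkt]
    simp
  have hgc : (countRow tags lst).getD k 0 = (lst.count k : Int) := by
    rw [PySem.Dict.getD_eq_get?_getD]
    have := get?_foldl_insertF tags PySem.Dict.empty (fun j => ((PySem.List.count lst j : Int))) k
    unfold countRow
    rw [this, if_pos hkt]
    rfl
  rw [hgb, hgc]

-- ===== VERDICT (by name: the statement is the Claim_ definition above) =====
theorem Initdata1_spec : Claim_equal_Initdata1 := by
  intro item_user movie_tags tags _
  unfold Spec_Initdata1 Initdata1 Initdata1_alt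
  set M : PySem.Dict String (List String) := PySem.Dict.ofList movie_tags with hMdef
  set K : List String := (PySem.Dict.ofList item_user : PySem.Dict String Int).keys with hKdef
  have hK : K.Nodup := PySem.Dict.nodup_keys_ofList _
  have hM : M.keys.Nodup := PySem.Dict.nodup_keys_ofList _
  simp only []
  -- A side: phase 1 then phase 2
  rw [phase1_eq tags K PySem.Dict.empty hK (fun i _ => PySem.Dict.contains_empty _)]
  rw [show (PySem.Dict.empty : PySem.Dict String (PySem.Dict String Int)).items = [] from rfl,
    List.nil_append]
  rw [phase2_eq M K hK M.keys hM (fun _ => zerosD tags)]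
  -- B side: fold of inserts over fresh distinct keys
  have hBitems : ((K.foldl (fun res i =>
      res.insert i
        (tags.foldl (fun c j => c.insert j ((PySem.List.count (M.getD i []) j : Int)))
          (PySem.Dict.empty : PySem.Dict String Int)))
      PySem.Dict.empty)).items
      = K.map (fun i => (i,
          tags.foldl (fun c j => c.insert j ((PySem.List.count (M.getD i []) j : Int)))
            (PySem.Dict.empty : PySem.Dict String Int))) := by
    rw [PySem.Dict.items_foldl_insert_fresh (k := fun a => a)
      (hdis := fun a _ => PySem.Dict.contains_empty _) (hnd := by simpa using hK)]
    rfl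
  rw [hBitems]
  simp only [List.map_map]
  apply List.map_congr_left
  intro k _
  simp only [Function.comp_apply]
  congr 1
  by_cases hk : k ∈ M.keys
  · rw [if_pos hk, rowEq]
    rfl
  · have hgd : M.getD k [] = [] := by
      have : M.get? k = none := by rw [PySem.Dict.get?_eq_none_iff_not_mem_keys]; exact hk
      rw [PySem.Dict.getD_eq_get?_getD, this]; rfl
    rw [if_neg hk, hgd]
    unfold zerosD
    have hcong : (tags.foldl (fun c j => c.insert j ((PySem.List.count ([] : List String) j : Int)))
        (PySem.Dict.empty : PySem.Dict String Int))
        = tags.foldl (fun c j => c.insert j 0) (PySem.Dict.empty : PySem.Dict String Int) := by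
      apply PySem.List.foldl_congr_mem
      intro acc x _
      norm_num [PySem.List.count]
    rw [hcong]
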